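-- pv_equiv track=rewrite | github.com/MockbaTheBorg/Epson | txt2prn.py | ascii_to_epson_graphics
-- ===== SOURCE A (Python) =====
-- def ascii_to_epson_graphics(pixels, dpi_mode='60', scale=1):
--     """
--     Convert 2D pixel array to Epson graphics bytes
--
--     Args:
--         pixels: 2D list of booleans (True = black)
--         dpi_mode: '60' for ESC K (60 dpi), '120' for ESC L (120 dpi)
--         scale: Integer scaling factor (1=normal, 2=double size, etc.)
--
--     Returns:
--         List of bytes for printer
--     """
--     ESC = 0x1B
--     CR = 0x0D
--     LF = 0x0A
--
--     # Graphics mode command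
--     if dpi_mode == '120':
--         gfx_cmd = 0x4C  # ESC L - 120 dpi
--     else:
--         gfx_cmd = 0x4B  # ESC K - 60 dpi
--
--     height = len(pixels)
--     width = len(pixels[0]) if height > 0 else 0
--
--     if width == 0 or height == 0:
--         raise ValueError("Empty image data")
--
--     # Apply scaling
--     if scale > 1:
--         scaled_pixels = []
--         for row in pixels:
--             # Repeat each row 'scale' times
--             for _ in range(scale):
--                 scaled_row = []
--                 for pixel in row:
--                     # Repeat each pixel 'scale' times
--                     scaled_row.extend([pixel] * scale)
--                 scaled_pixels.append(scaled_row)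
--         pixels = scaled_pixels
--         height = len(pixels)
--         width = len(pixels[0])
--
--     data = []
--
--     # Set printer LPI to 8/72 inch
--     data.append(ESC)
--     data.append(0x41)  # ESC A
--     data.append(0x08)  # 8/72 inch LPI
--
--     # Process image in strips of 8 pixels high (one byte per column)
--     for y in range(0, height, 8):
--         # Start graphics mode
--         data.append(ESC)
--         data.append(gfx_cmd)
--
--         # Send width as low byte, high byte
--         data.append(width & 0xFF)
--         data.append((width >> 8) & 0xFF)
--
--         # Process each column
--         for x in range(width):
--             byte_val = 0
--             # Pack 8 vertical pixels into one byte
--             for bit in range(8):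
--                 if y + bit < height:
--                     # Check if pixel is black (True)
--                     if pixels[y + bit][x]:
--                         byte_val |= (1 << (7 - bit))
--
--             data.append(byte_val)
--
--         # Line feed
--         data.append(CR)
--         data.append(LF)
--
--     # Reset printer
--     data.append(ESC)
--     data.append(0x40)  # ESC @
--
--     return data
-- ===== SOURCE B (Python) =====
-- def ascii_to_epson_graphics(pixels, dpi_mode='60', scale=1):
--     """Same encoding, but built declaratively: no scaled-array materialization
--     (scaling folded into index arithmetic), strips assembled by comprehensions
--     and flattened, and each column byte computed as a sum of filtered bit
--     weights instead of an OR-accumulator loop."""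
--     if not pixels or not pixels[0]:
--         raise ValueError("Empty image data")
--     eff = scale if scale > 1 else 1
--     H = len(pixels) * eff
--     W = len(pixels[0]) * eff
--     gfx = 0x4C if dpi_mode == '120' else 0x4B
--
--     def col(y, x):
--         return sum(128 >> bit for bit in range(8)
--                    if y + bit < H and pixels[(y + bit) // eff][x // eff])
--
--     strips = [[0x1B, gfx, W & 0xFF, (W >> 8) & 0xFF]
--               + [col(y, x) for x in range(W)]
--               + [0x0D, 0x0A]
--               for y in range(0, H, 8)]
--     return [0x1B, 0x41, 0x08] + [b for s in strips for b in s] + [0x1B, 0x40]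
-- ===== Notes on version B (the rewrite author's own statement) =====
-- stated objective: alternative
-- what changed: B never materializes the scaled pixel array (scaling is folded into index arithmetic pixels[r//eff][x//eff]) and builds the output declaratively: strips as list comprehensions flattened at the end, with each column byte a sum of filtered bit weights 128>>bit instead of an OR-accumulator loop over an appended data list.
import Mathlib
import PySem

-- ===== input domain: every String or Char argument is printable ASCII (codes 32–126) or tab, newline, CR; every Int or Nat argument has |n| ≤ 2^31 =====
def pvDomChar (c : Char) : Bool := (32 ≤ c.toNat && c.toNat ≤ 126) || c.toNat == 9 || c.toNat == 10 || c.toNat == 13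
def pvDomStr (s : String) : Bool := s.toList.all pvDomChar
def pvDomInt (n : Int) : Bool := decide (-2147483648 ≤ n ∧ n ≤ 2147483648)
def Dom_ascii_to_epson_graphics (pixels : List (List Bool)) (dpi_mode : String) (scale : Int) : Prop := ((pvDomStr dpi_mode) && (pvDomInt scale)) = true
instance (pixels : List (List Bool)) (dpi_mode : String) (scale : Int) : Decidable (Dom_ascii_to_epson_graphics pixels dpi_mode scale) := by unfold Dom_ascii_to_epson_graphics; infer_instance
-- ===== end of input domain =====

-- B drops A's materialized scaled-pixel array (scaling becomes index arithmetic
-- pixels[r // eff][x // eff]) and assembles the output declaratively: strips built by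
-- map and flattened, each column byte a sum of filtered bit weights 128 >> bit instead
-- of an OR-accumulator loop; return values agree on all non-raising inputs.

-- ===== PORT A =====
def ascii_to_epson_graphics (pixels : List (List Bool)) (dpi_mode : String) (scale : Int) : List Int :=
  let ESC : Int := 0x1B
  let CR : Int := 0x0D
  let LF : Int := 0x0A
  let gfx_cmd : Int := if dpi_mode = "120" then 0x4C else 0x4B
  let height0 : Int := PySem.List.len pixels
  let width0 : Int := if height0 > 0 then PySem.List.len (PySem.List.pyGetD pixels 0 []) else 0
  if width0 = 0 ∨ height0 = 0 then []   -- Python raises ValueError here; excluded by Pre_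
  else
    -- apply scaling: build the scaled matrix row by row, pixel by pixel
    let px : List (List Bool) :=
      if scale > 1 then
        pixels.foldl (fun sp row =>
          (PySem.List.pyRange 0 scale 1).foldl (fun sp _ =>
            sp ++ [row.foldl (fun sr p => sr ++ List.replicate scale.toNat p) []]) sp) []
      else pixels
    let height : Int := if scale > 1 then PySem.List.len px else height0
    let width : Int := if scale > 1 then PySem.List.len (PySem.List.pyGetD px 0 []) else width0
    let data : List Int := [ESC, 0x41, 0x08]
    let data := (PySem.List.pyRange 0 height 8).foldl (fun data y =>
      let data := data ++ [ESC, gfx_cmd, PySem.Int.band width 0xFF, PySem.Int.band (width >>> (8 : Nat)) 0xFF]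
      let data := (PySem.List.pyRange 0 width 1).foldl (fun data x =>
        let byte_val := (PySem.List.pyRange 0 8 1).foldl (fun bv bit =>
          if y + bit < height then
            if PySem.List.pyGetD (PySem.List.pyGetD px (y + bit) []) x false then
              PySem.Int.bor bv (1 <<< (7 - bit).toNat)
            else bv
          else bv) 0
        data ++ [byte_val]) data
      data ++ [CR, LF]) data
    data ++ [ESC, 0x40]

-- ===== PORT B =====
def ascii_to_epson_graphics_alt (pixels : List (List Bool)) (dpi_mode : String) (scale : Int) : List Int :=
  if pixels = [] ∨ PySem.List.pyGetD pixels 0 [] = [] then []   -- Python raises ValueError here; excluded by Pre_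
  else
    let eff : Int := if scale > 1 then scale else 1
    let H : Int := PySem.List.len pixels * eff
    let W : Int := PySem.List.len (PySem.List.pyGetD pixels 0 []) * eff
    let gfx : Int := if dpi_mode = "120" then 0x4C else 0x4B
    let col : Int → Int → Int := fun y x =>
      (((PySem.List.pyRange 0 8 1).filter (fun bit =>
          decide (y + bit < H) &&
          PySem.List.pyGetD (PySem.List.pyGetD pixels (PySem.Int.floordiv (y + bit) eff) [])
            (PySem.Int.floordiv x eff) false)).map
        (fun bit => (128 : Int) >>> bit.toNat)).sum
    let strips : List (List Int) :=
      (PySem.List.pyRange 0 H 8).map (fun y =>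
        [0x1B, gfx, PySem.Int.band W 0xFF, PySem.Int.band (W >>> (8 : Nat)) 0xFF]
        ++ (PySem.List.pyRange 0 W 1).map (fun x => col y x)
        ++ [0x0D, 0x0A])
    [0x1B, 0x41, 0x08] ++ strips.flatMap (fun s => s) ++ [0x1B, 0x40]

-- ===== PRECONDITION & SPEC =====
-- Pre_ excludes exactly the inputs where Python A raises: an empty image (ValueError)
-- and a later row shorter than the first row (IndexError while packing columns).
def Pre_ascii_to_epson_graphics (pixels : List (List Bool)) (dpi_mode : String) (scale : Int) : Prop :=
  pixels ≠ [] ∧ pixels.headD [] ≠ [] ∧ ∀ row ∈ pixels, (pixels.headD []).length ≤ row.length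
instance (pixels : List (List Bool)) (dpi_mode : String) (scale : Int) : Decidable (Pre_ascii_to_epson_graphics pixels dpi_mode scale) := by unfold Pre_ascii_to_epson_graphics; infer_instance
def pvWitness_ascii_to_epson_graphics : List (List Bool) × String × Int := ([[true, false], [false, true]], "60", 2)

def Spec_ascii_to_epson_graphics (pixels : List (List Bool)) (dpi_mode : String) (scale : Int) (out : List Int) : Prop := out = ascii_to_epson_graphics_alt pixels dpi_mode scale
instance (pixels : List (List Bool)) (dpi_mode : String) (scale : Int) (out : List Int) : Decidable (Spec_ascii_to_epson_graphics pixels dpi_mode scale out) := by unfold Spec_ascii_to_epson_graphics; infer_instance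

-- ===== CLAIM (what is proved, stated in full; the proofs are below) =====
def Claim_equal_ascii_to_epson_graphics : Prop := ∀ (pixels : List (List Bool)) (dpi_mode : String) (scale : Int), Dom_ascii_to_epson_graphics pixels dpi_mode scale → Pre_ascii_to_epson_graphics pixels dpi_mode scale → Spec_ascii_to_epson_graphics pixels dpi_mode scale (ascii_to_epson_graphics pixels dpi_mode scale)

-- ===== LEMMAS AND PROOFS =====

-- OR-accumulating the weight 1 <<< (7-bit) over bits 0..7 equals summing the weights 128 >>> bit of the kept bits
set_option maxHeartbeats 1000000 in
theorem pvPack (c : Int → Bool) :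
    (PySem.List.pyRange 0 8 1).foldl (fun bv bit =>
      if c bit then PySem.Int.bor bv (1 <<< (7 - bit).toNat) else bv) 0
    = (((PySem.List.pyRange 0 8 1).filter c).map (fun bit => (128 : Int) >>> bit.toNat)).sum := by
  have h8 : PySem.List.pyRange 0 8 1 = [0, 1, 2, 3, 4, 5, 6, 7] := by decide
  rw [h8]
  cases h0 : c 0 <;> cases h1 : c 1 <;> cases h2 : c 2 <;> cases h3 : c 3 <;>
    cases h4 : c 4 <;> cases h5 : c 5 <;> cases h6 : c 6 <;> cases h7 : c 7 <;>
      simp only [List.foldl_cons, List.foldl_nil, List.filter_cons, List.filter_nil,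
        List.map_cons, List.map_nil, List.sum_cons, List.sum_nil,
        h0, h1, h2, h3, h4, h5, h6, h7, if_true, if_false, Bool.false_eq_true] <;>
      decide

-- one column byte: A's nested-if OR loop with accessor F equals B's filtered weight sum with accessor G
theorem pvByte (H y x : Int) (F G : Int → Int → Bool)
    (h : ∀ bit : Int, 0 ≤ bit → F (y + bit) x = G (y + bit) x) :
    (PySem.List.pyRange 0 8 1).foldl (fun bv bit =>
        if y + bit < H then
          if F (y + bit) x then PySem.Int.bor bv (1 <<< (7 - bit).toNat) else bv
        else bv) 0
    = (((PySem.List.pyRange 0 8 1).filter (fun bit => decide (y + bit < H) && G (y + bit) x)).map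
        (fun bit => (128 : Int) >>> bit.toNat)).sum := by
  refine (PySem.List.foldl_congr_mem _ _ _ _ ?_).trans
    (pvPack (fun bit => decide (y + bit < H) && G (y + bit) x))
  intro acc bit hbit
  have hb0 : 0 ≤ bit := (PySem.List.mem_pyRange_one.1 hbit).1
  rw [← h bit hb0]
  by_cases hlt : y + bit < H
  · cases hF : F (y + bit) x <;> simp [hlt]
  · simp [hlt]

-- the whole emit pipeline: A's foldl-append loops equal B's map/flatMap form
theorem pvEmit (H W gfx : Int) (F G : Int → Int → Bool) (d0 : List Int)
    (h : ∀ r x : Int, 0 ≤ r → 0 ≤ x → F r x = G r x) :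
    ((PySem.List.pyRange 0 H 8).foldl (fun data y =>
      ((PySem.List.pyRange 0 W 1).foldl (fun data x =>
        data ++ [(PySem.List.pyRange 0 8 1).foldl (fun bv bit =>
          if y + bit < H then
            if F (y + bit) x then PySem.Int.bor bv (1 <<< (7 - bit).toNat) else bv
          else bv) 0])
        (data ++ [27, gfx, PySem.Int.band W 255, PySem.Int.band (W >>> (8 : Nat)) 255]))
      ++ [13, 10]) d0)
    = d0 ++ (PySem.List.pyRange 0 H 8).flatMap (fun y =>
        [27, gfx, PySem.Int.band W 255, PySem.Int.band (W >>> (8 : Nat)) 255]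
        ++ (PySem.List.pyRange 0 W 1).map (fun x =>
            (((PySem.List.pyRange 0 8 1).filter (fun bit => decide (y + bit < H) && G (y + bit) x)).map
              (fun bit => (128 : Int) >>> bit.toNat)).sum)
        ++ [13, 10]) := by
  refine (PySem.List.foldl_congr_mem _ _ _ _ ?_).trans
    (PySem.List.foldl_append_eq_flatMap _ _ _)
  intro acc y hy
  have hy0 : 0 ≤ y := by
    have := (PySem.List.mem_pyRange_iff_of_pos (by norm_num : (0 : Int) < 8) y).1 hy
    omega
  rw [PySem.List.foldl_append_singleton_eq_map]
  rw [List.map_congr_left (fun x hx => pvByte H y x F G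
    (fun bit hb => h (y + bit) x (by omega) (PySem.List.mem_pyRange_one.1 hx).1))]
  simp [List.append_assoc]

theorem pvGetDFlatMapRep {α β : Type} (e : Nat) (he : 0 < e) (g : α → β) (xs : List α) (n : Nat) (d : β) :
    (xs.flatMap (fun a => List.replicate e (g a))).getD n d = (xs.map g).getD (n / e) d := by
  induction xs generalizing n with
  | nil => simp
  | cons a t ih =>
    simp only [List.flatMap_cons, List.map_cons]
    by_cases h : n < e
    · rw [List.getD_append _ _ _ _ (by simpa using h),
        Nat.div_eq_of_lt h]
      simp [List.getD, h]
    · rw [List.getD_append_right _ _ _ _ (by simpa using Nat.le_of_not_lt h),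
        List.length_replicate, ih,
        Nat.div_eq_sub_div he (Nat.le_of_not_lt h)]
      simp [List.getD]

theorem pvAccessScaled (e : Nat) (he : 0 < e) (pixels : List (List Bool)) (i j : Nat) :
    ((pixels.flatMap (fun row => List.replicate e (row.flatMap (fun p => List.replicate e p)))).getD i []).getD j false
    = (pixels.getD (i / e) []).getD (j / e) false := by
  rw [pvGetDFlatMapRep e he _ pixels i []]
  have h1 : (pixels.map (fun row => row.flatMap (fun p => List.replicate e p))).getD (i / e) []
      = (pixels.getD (i / e) []).flatMap (fun p => List.replicate e p) := by
    rw [List.getD_eq_getElem?_getD, List.getElem?_map, List.getD_eq_getElem?_getD]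
    cases pixels[i / e]? <;> rfl
  rw [h1]
  have := pvGetDFlatMapRep e he (fun p : Bool => p) (pixels.getD (i / e) []) j false
  simpa using this

theorem pvPyGetDNonneg {α : Type} (xs : List α) (i : Int) (d : α) (h : 0 ≤ i) :
    PySem.List.pyGetD xs i d = xs.getD i.toNat d := by
  have h2 : i = ((i.toNat : Nat) : Int) := (Int.toNat_of_nonneg h).symm
  rw [h2, PySem.List.pyGetD_natCast]
  simp [max_eq_left h]

theorem pvLenFlatMapRep {α β : Type} (e : Nat) (g : α → List β) (xs : List α) :
    (xs.flatMap (fun a => List.replicate e (g a))).length = xs.length * e := by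
  induction xs with
  | nil => simp
  | cons a t ih => simp [ih, Nat.succ_mul, Nat.add_comm]

theorem pvScaledEq (pixels : List (List Bool)) (scale : Int) :
    pixels.foldl (fun sp row =>
        (PySem.List.pyRange 0 scale 1).foldl (fun sp _ =>
          sp ++ [row.foldl (fun sr p => sr ++ List.replicate scale.toNat p) []]) sp) []
    = pixels.flatMap (fun row => List.replicate (scale.toNat) (row.flatMap (fun p => List.replicate scale.toNat p))) := by
  have hrow : ∀ (row : List Bool),
      row.foldl (fun sr p => sr ++ List.replicate scale.toNat p) [] = row.flatMap (fun p => List.replicate scale.toNat p) := by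
    intro row
    simpa using PySem.List.foldl_append_eq_flatMap (fun p : Bool => List.replicate scale.toNat p) row []
  have hinner : ∀ (sp : List (List Bool)) (row : List Bool),
      (PySem.List.pyRange 0 scale 1).foldl (fun sp _ =>
        sp ++ [row.foldl (fun sr p => sr ++ List.replicate scale.toNat p) []]) sp
      = sp ++ List.replicate scale.toNat (row.flatMap (fun p => List.replicate scale.toNat p)) := by
    intro sp row
    rw [PySem.List.foldl_append_singleton_eq_map]
    congr 1
    simp only [hrow]
    rw [List.map_const', PySem.List.length_pyRange_one]
    simp
  calc pixels.foldl (fun sp row =>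
        (PySem.List.pyRange 0 scale 1).foldl (fun sp _ =>
          sp ++ [row.foldl (fun sr p => sr ++ List.replicate scale.toNat p) []]) sp) []
      = pixels.foldl (fun sp row => sp ++ List.replicate scale.toNat (row.flatMap (fun p => List.replicate scale.toNat p))) [] := by
        apply PySem.List.foldl_congr_mem
        intro acc row _
        exact hinner acc row
    _ = _ := by
        simpa using PySem.List.foldl_append_eq_flatMap
          (fun row : List Bool => List.replicate scale.toNat (row.flatMap (fun p => List.replicate scale.toNat p))) pixels []

-- ===== VERDICT (by name: the statement is the Claim_ definition above) =====
theorem ascii_to_epson_graphics_spec : Claim_equal_ascii_to_epson_graphics := by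
  intro pixels dpi_mode scale _ hpre
  obtain ⟨hne, hrow0, _⟩ := hpre
  unfold Spec_ascii_to_epson_graphics
  obtain ⟨r0, rest, rfl⟩ : ∃ r0 rest, pixels = r0 :: rest := by
    cases pixels with
    | nil => exact absurd rfl hne
    | cons a l => exact ⟨a, l, rfl⟩
  simp only [List.headD_cons] at hrow0
  simp only [ascii_to_epson_graphics, ascii_to_epson_graphics_alt, PySem.List.pyGetD_zero_cons]
  have h1 : PySem.List.len (r0 :: rest) > 0 := by simp [PySem.List.len_eq]
  rw [if_pos h1]
  have h2 : ¬(PySem.List.len r0 = 0 ∨ PySem.List.len (r0 :: rest) = 0) := by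
    simp [PySem.List.len_eq]
    exact ⟨hrow0, by omega⟩
  rw [if_neg h2]
  have h3 : ¬((r0 :: rest : List (List Bool)) = [] ∨ r0 = []) := by simp [hrow0]
  rw [if_neg h3]
  by_cases hs : scale > 1
  · simp only [if_pos hs]
    rw [pvScaledEq]
    have he : (0 : Nat) < scale.toNat := by omega
    have hsc : scale = ((scale.toNat : Nat) : Int) := (Int.toNat_of_nonneg (by omega)).symm
    have hH : PySem.List.len (List.flatMap (fun row => List.replicate scale.toNat
          (List.flatMap (fun p => List.replicate scale.toNat p) row)) (r0 :: rest))
        = PySem.List.len (r0 :: rest) * scale := by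
      simp only [PySem.List.len_eq, pvLenFlatMapRep]
      rw [Nat.cast_mul, Int.toNat_of_nonneg (by omega : (0 : Int) ≤ scale)]
    have hget : PySem.List.pyGetD (List.flatMap (fun row => List.replicate scale.toNat
          (List.flatMap (fun p => List.replicate scale.toNat p) row)) (r0 :: rest)) 0 []
        = List.flatMap (fun p => List.replicate scale.toNat p) r0 := by
      rw [PySem.List.pyGetD_zero]
      simp only [List.flatMap_cons]
      obtain ⟨k, hk⟩ : ∃ k, scale.toNat = k + 1 := ⟨scale.toNat - 1, by omega⟩
      rw [hk]
      simp [List.replicate_succ]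
    have hW : PySem.List.len (PySem.List.pyGetD (List.flatMap (fun row => List.replicate scale.toNat
          (List.flatMap (fun p => List.replicate scale.toNat p) row)) (r0 :: rest)) 0 [])
        = PySem.List.len r0 * scale := by
      rw [hget]
      simp only [PySem.List.len_eq]
      rw [(by simpa using pvLenFlatMapRep scale.toNat (fun p : Bool => p) r0 :
        (List.flatMap (fun p => List.replicate scale.toNat p) r0).length = r0.length * scale.toNat)]
      rw [Nat.cast_mul, Int.toNat_of_nonneg (by omega : (0 : Int) ≤ scale)]
    rw [hH, hW]
    have hFG : ∀ r x : Int, 0 ≤ r → 0 ≤ x →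
        PySem.List.pyGetD (PySem.List.pyGetD (List.flatMap (fun row => List.replicate scale.toNat
          (List.flatMap (fun p => List.replicate scale.toNat p) row)) (r0 :: rest)) r []) x false
        = PySem.List.pyGetD (PySem.List.pyGetD (r0 :: rest) (PySem.Int.floordiv r scale) [])
            (PySem.Int.floordiv x scale) false := by
      intro r x hr hx
      rw [pvPyGetDNonneg _ r _ hr, pvPyGetDNonneg _ x _ hx]
      have h4 : PySem.Int.floordiv r scale = ((r.toNat / scale.toNat : Nat) : Int) := by
        conv_lhs => rw [show r = ((r.toNat : Nat) : Int) from (Int.toNat_of_nonneg hr).symm, hsc]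
        exact PySem.Int.floordiv_natCast _ _
      have h5 : PySem.Int.floordiv x scale = ((x.toNat / scale.toNat : Nat) : Int) := by
        conv_lhs => rw [show x = ((x.toNat : Nat) : Int) from (Int.toNat_of_nonneg hx).symm, hsc]
        exact PySem.Int.floordiv_natCast _ _
      rw [h4, h5, PySem.List.pyGetD_natCast, PySem.List.pyGetD_natCast]
      exact pvAccessScaled scale.toNat he (r0 :: rest) r.toNat x.toNat
    refine (congrArg (· ++ ([27, 64] : List Int)) (pvEmit (PySem.List.len (r0 :: rest) * scale)
      (PySem.List.len r0 * scale) (if dpi_mode = "120" then 76 else 75) _ _ [27, 65, 8] hFG)).trans ?_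
    simp [List.flatMap_def, Function.comp_def]
  · simp only [if_neg hs, mul_one]
    have hdiv1 : ∀ r : Int, PySem.Int.floordiv r 1 = r := fun r => by
      rw [PySem.Int.floordiv_eq_ediv_of_pos one_pos]; exact Int.ediv_one r
    simp only [hdiv1]
    have hFG : ∀ r x : Int, 0 ≤ r → 0 ≤ x →
        PySem.List.pyGetD (PySem.List.pyGetD (r0 :: rest) r []) x false
        = PySem.List.pyGetD (PySem.List.pyGetD (r0 :: rest) r []) x false :=
      fun _ _ _ _ => rfl
    refine (congrArg (· ++ ([27, 64] : List Int)) (pvEmit (PySem.List.len (r0 :: rest))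
      (PySem.List.len r0) (if dpi_mode = "120" then 76 else 75) _ _ [27, 65, 8] hFG)).trans ?_
    simp [List.flatMap_def, Function.comp_def]
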